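-- pv_equiv track=rewrite | github.com/HashimsGitHub/IEEE_754-App | streamlit_app.py | create_bitfield_html
-- ===== SOURCE A (Python) =====
-- def create_bitfield_html(bits: str) -> str:
--     """Color-coded bitfield: Sign (red), Exponent (yellow), Mantissa (green)"""
--     sign_color = '#f28b82'
--     exp_color = '#fbbc04'
--     mant_color = '#34a853'
--
--     s = bits[0]
--     e = bits[1:9]
--     m = bits[9:]
--
--     style = f"""
--     <style>
--     .bitfield {{ font-family: monospace; display: flex; flex-wrap: wrap; justify-content: center; margin: 10px 0; }}
--     .bit {{ padding: 4px; margin: 1px; border-radius: 4px; color: white; font-size: 14px; text-align: center; }}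
--     .sign {{ background-color: {sign_color}; }}
--     .exp {{ background-color: {exp_color}; }}
--     .mant {{ background-color: {mant_color}; }}
--     </style>
--     """
--
--     html = style + '<div class="bitfield">'
--     html += f'<div class="bit sign">{s}</div>'
--     html += ''.join([f'<div class="bit exp">{b}</div>' for b in e])
--     html += ''.join([f'<div class="bit mant">{b}</div>' for b in m])
--     html += '</div>'
--     html += f'<p><b>Legend:</b> <span style="color:{sign_color}">Sign</span>, <span style="color:{exp_color}">Exponent</span>, <span style="color:{mant_color}">Mantissa</span></p>'
--
--     return html
-- ===== SOURCE B (Python) =====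
-- def create_bitfield_html(bits: str) -> str:
--     """Color-coded bitfield: Sign (red), Exponent (yellow), Mantissa (green)"""
--     sign_color = '#f28b82'
--     exp_color = '#fbbc04'
--     mant_color = '#34a853'
--
--     style = f"""
--     <style>
--     .bitfield {{ font-family: monospace; display: flex; flex-wrap: wrap; justify-content: center; margin: 10px 0; }}
--     .bit {{ padding: 4px; margin: 1px; border-radius: 4px; color: white; font-size: 14px; text-align: center; }}
--     .sign {{ background-color: {sign_color}; }}
--     .exp {{ background-color: {exp_color}; }}
--     .mant {{ background-color: {mant_color}; }}
--     </style>
--     """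
--
--     parts = [style, '<div class="bitfield">']
--     for i, b in enumerate(bits):
--         cls = 'sign' if i == 0 else ('exp' if i < 9 else 'mant')
--         parts.append(f'<div class="bit {cls}">{b}</div>')
--     parts.append('</div>')
--     parts.append(f'<p><b>Legend:</b> <span style="color:{sign_color}">Sign</span>, <span style="color:{exp_color}">Exponent</span>, <span style="color:{mant_color}">Mantissa</span></p>')
--     return ''.join(parts)
-- ===== Notes on version B (the rewrite author's own statement) =====
-- stated objective: alternative
-- what changed: Instead of slicing the bit string into sign/exponent/mantissa parts and joining three separate comprehensions, B makes a single enumerate pass over the bits, choosing the CSS class from the index (0 -> sign, 1-8 -> exp, >=9 -> mant) and appending each div to one parts list that is joined once; Pre_ excludes only the empty string, on which A raises IndexError at bits[0].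
import Mathlib
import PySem

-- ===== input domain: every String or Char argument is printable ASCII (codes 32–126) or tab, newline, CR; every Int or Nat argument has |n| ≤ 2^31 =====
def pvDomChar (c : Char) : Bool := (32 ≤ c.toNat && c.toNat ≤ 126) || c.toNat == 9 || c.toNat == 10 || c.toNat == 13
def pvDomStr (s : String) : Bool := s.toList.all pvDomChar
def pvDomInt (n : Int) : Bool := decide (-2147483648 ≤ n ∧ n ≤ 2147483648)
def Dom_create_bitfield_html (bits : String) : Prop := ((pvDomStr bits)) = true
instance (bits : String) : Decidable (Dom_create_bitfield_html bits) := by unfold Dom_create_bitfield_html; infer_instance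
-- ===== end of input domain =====

-- B replaces A's slice-into-three-parts + three joins by a single enumerate loop that picks
-- the CSS class from the index (alternative decomposition, same cost); B returns the natural
-- page (empty bitfield) on the empty string, where A raises IndexError.

-- ===== PORT A =====
def pvStyleA : String := "\n    <style>\n    .bitfield { font-family: monospace; display: flex; flex-wrap: wrap; justify-content: center; margin: 10px 0; }\n    .bit { padding: 4px; margin: 1px; border-radius: 4px; color: white; font-size: 14px; text-align: center; }\n    .sign { background-color: #f28b82; }\n    .exp { background-color: #fbbc04; }\n    .mant { background-color: #34a853; }\n    </style>\n    "

def pvLegendA : String := "<p><b>Legend:</b> <span style=\"color:#f28b82\">Sign</span>, <span style=\"color:#fbbc04\">Exponent</span>, <span style=\"color:#34a853\">Mantissa</span></p>"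

-- literal port of A: bits[0] (IndexError on "" is excluded by Pre_), bits[1:9], bits[9:],
-- then style + opening div + sign div + two joined comprehensions + closing div + legend
def create_bitfield_html (bits : String) : String :=
  String.ofList (pvStyleA.toList ++ "<div class=\"bitfield\">".toList
    ++ ("<div class=\"bit sign\">".toList ++ [PySem.List.pyGetD bits.toList 0 ' '] ++ "</div>".toList)
    ++ (PySem.List.slice bits.toList (some 1) (some 9)).flatMap
         (fun b => "<div class=\"bit exp\">".toList ++ [b] ++ "</div>".toList)
    ++ (PySem.List.slice bits.toList (some 9) none).flatMap
         (fun b => "<div class=\"bit mant\">".toList ++ [b] ++ "</div>".toList)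
    ++ "</div>".toList ++ pvLegendA.toList)

-- ===== PORT B =====
def pvStyleB : String := "\n    <style>\n    .bitfield { font-family: monospace; display: flex; flex-wrap: wrap; justify-content: center; margin: 10px 0; }\n    .bit { padding: 4px; margin: 1px; border-radius: 4px; color: white; font-size: 14px; text-align: center; }\n    .sign { background-color: #f28b82; }\n    .exp { background-color: #fbbc04; }\n    .mant { background-color: #34a853; }\n    </style>\n    "

def pvLegendB : String := "<p><b>Legend:</b> <span style=\"color:#f28b82\">Sign</span>, <span style=\"color:#fbbc04\">Exponent</span>, <span style=\"color:#34a853\">Mantissa</span></p>"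

-- 'sign' if i == 0 else ('exp' if i < 9 else 'mant')
def pvClass (i : Int) : String := if i = 0 then "sign" else if i < 9 then "exp" else "mant"

-- literal port of B: a parts list, one enumerate loop appending a div per bit, ''.join(parts)
def create_bitfield_html_alt (bits : String) : String :=
  String.ofList
    (((PySem.List.enumerate bits.toList 0).foldl
        (fun acc p => acc ++ ["<div class=\"bit ".toList ++ (pvClass p.1).toList
                              ++ "\">".toList ++ [p.2] ++ "</div>".toList])
        [pvStyleB.toList, "<div class=\"bitfield\">".toList]
      ++ ["</div>".toList, pvLegendB.toList]).flatten)

-- ===== PRECONDITION & SPEC =====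
-- Pre_ excludes only the empty string, on which A raises IndexError at bits[0].
def Pre_create_bitfield_html (bits : String) : Prop := bits.toList ≠ []
instance (bits : String) : Decidable (Pre_create_bitfield_html bits) := by unfold Pre_create_bitfield_html; infer_instance
def pvWitness_create_bitfield_html : String := "01000000010010010000111111011011"

def Spec_create_bitfield_html (bits : String) (out : String) : Prop := out = create_bitfield_html_alt bits
instance (bits : String) (out : String) : Decidable (Spec_create_bitfield_html bits out) := by unfold Spec_create_bitfield_html; infer_instance

-- ===== CLAIM (what is proved, stated in full; the proofs are below) =====
def Claim_equal_create_bitfield_html : Prop := ∀ (bits : String), Dom_create_bitfield_html bits → Pre_create_bitfield_html bits → Spec_create_bitfield_html bits (create_bitfield_html bits)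

-- ===== LEMMAS AND PROOFS =====

-- B's loop body as a function of the enumerate pair
def pvBDiv (p : Int × Char) : List Char :=
  "<div class=\"bit ".toList ++ (pvClass p.1).toList ++ "\">".toList ++ [p.2] ++ "</div>".toList

lemma pvBDiv_exp (c : Char) (n : Int) (h1 : n ≠ 0) (h9 : n < 9) :
    pvBDiv (n, c) = "<div class=\"bit exp\">".toList ++ [c] ++ "</div>".toList := by
  simp only [pvBDiv, pvClass, if_neg h1, if_pos h9]
  rw [show ("<div class=\"bit ".toList ++ ("exp" : String).toList ++ "\">".toList : List Char)
        = "<div class=\"bit exp\">".toList from by decide]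

lemma pvBDiv_mant (c : Char) (n : Int) (h1 : n ≠ 0) (h9 : ¬ n < 9) :
    pvBDiv (n, c) = "<div class=\"bit mant\">".toList ++ [c] ++ "</div>".toList := by
  simp only [pvBDiv, pvClass, if_neg h1, if_neg h9]
  rw [show ("<div class=\"bit ".toList ++ ("mant" : String).toList ++ "\">".toList : List Char)
        = "<div class=\"bit mant\">".toList from by decide]

lemma pvBDiv_sign (c : Char) :
    pvBDiv (0, c) = "<div class=\"bit sign\">".toList ++ [c] ++ "</div>".toList := by
  simp only [pvBDiv, pvClass, reduceIte]
  rw [show ("<div class=\"bit ".toList ++ ("sign" : String).toList ++ "\">".toList : List Char)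
        = "<div class=\"bit sign\">".toList from by decide]

lemma pvEnumFlat (xs : List Char) (n : Int) (h : 1 ≤ n) :
    ((PySem.List.enumerate xs n).map pvBDiv).flatten =
      (xs.take (9 - n).toNat).flatMap (fun b => "<div class=\"bit exp\">".toList ++ [b] ++ "</div>".toList)
      ++ (xs.drop (9 - n).toNat).flatMap (fun b => "<div class=\"bit mant\">".toList ++ [b] ++ "</div>".toList) := by
  induction xs generalizing n with
  | nil => simp [PySem.List.enumerate_nil]
  | cons c xs ih =>
    rw [PySem.List.enumerate_cons]
    by_cases h9 : n < 9
    · have hk : (9 - n).toNat = (9 - (n + 1)).toNat + 1 := by omega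
      rw [hk]
      simp only [List.map_cons, List.flatten_cons, List.take_succ_cons, List.drop_succ_cons,
        List.flatMap_cons, ih (n + 1) (by omega), pvBDiv_exp c n (by omega) h9]
      simp
    · have hk : (9 - n).toNat = 0 := by omega
      have hk' : (9 - (n + 1)).toNat = 0 := by omega
      rw [hk]
      simp only [List.map_cons, List.flatten_cons, List.take_zero, List.drop_zero,
        List.flatMap_nil, List.flatMap_cons, ih (n + 1) (by omega), hk',
        pvBDiv_mant c n (by omega) h9]
      simp

-- ===== VERDICT (by name: the statement is the Claim_ definition above) =====
set_option maxRecDepth 100000 in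
theorem create_bitfield_html_spec : Claim_equal_create_bitfield_html := by
  intro bits _ hpre
  unfold Spec_create_bitfield_html create_bitfield_html create_bitfield_html_alt
  obtain ⟨c, rest, hl⟩ : ∃ c rest, bits.toList = c :: rest := by
    cases h : bits.toList with
    | nil => exact absurd h hpre
    | cons c rest => exact ⟨c, rest, rfl⟩
  rw [hl]
  rw [PySem.List.foldl_append_singleton_eq_map]
  apply congrArg String.ofList
  rw [show (fun (p : Int × Char) => "<div class=\"bit ".toList ++ (pvClass p.1).toList
        ++ "\">".toList ++ [p.2] ++ "</div>".toList) = pvBDiv from rfl]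
  rw [PySem.List.enumerate_cons]
  simp only [List.map_cons, zero_add, List.flatten_append, List.flatten_cons,
    List.flatten_nil, List.append_nil]
  rw [pvEnumFlat rest 1 (by omega), pvBDiv_sign]
  rw [PySem.List.pyGetD_zero_cons,
      PySem.List.slice_toNat,
      PySem.List.slice_from]
  rw [show pvStyleA = pvStyleB from rfl, show pvLegendA = pvLegendB from rfl]
  rw [show List.take (Int.toNat 9 - Int.toNat 1) (List.drop (Int.toNat 1) (c :: rest))
        = List.take 8 rest from rfl,
      show List.drop (Int.toNat 9) (c :: rest) = List.drop 8 rest from rfl,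
      show ((9 - 1 : Int)).toNat = 8 from rfl]
  · simp [List.append_assoc]
  all_goals norm_num
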